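-- pv_equiv track=rewrite | github.com/GuidoMateoBZ/proyectos-evaluativos-ia | 1er_Proyecto_Evaluativo_IA/molinos_sa.py | contar_estela
-- ===== SOURCE A (Python) =====
-- def contar_estela(idx, molinos):
--     molino = molinos[idx]
--     estela = 0
--     for i, otro in enumerate(molinos):
--         if i == idx:
--             continue
--         if otro == molino:
--             estela += 1
--             continue
--         if (molino[0] == otro[0] and 0 < (molino[1] - otro[1]) <= 3):
--             estela += 1
--         elif (molino[1] == otro[1] and 0 < (otro[0] - molino[0]) <= 3):
--             estela += 1
--     return estela
-- ===== SOURCE B (Python) =====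
-- def contar_estela(idx, molinos):
--     x, y = molinos[idx][0], molinos[idx][1]
--     contador = {}
--     for i, m in enumerate(molinos):
--         if i != idx:
--             clave = (m[0], m[1])
--             contador[clave] = contador.get(clave, 0) + 1
--     estela = 0
--     for clave in ((x, y), (x, y - 1), (x, y - 2), (x, y - 3),
--                   (x + 1, y), (x + 2, y), (x + 3, y)):
--         estela += contador.get(clave, 0)
--     return estela
-- ===== Notes on version B (the rewrite author's own statement) =====
-- stated objective: alternative
-- what changed: Replaces A's per-element chain of equality/offset branch tests by a frequency table (dict) of the other windmills' positions built once, then seven constant-key lookups summed.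
import Mathlib
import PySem

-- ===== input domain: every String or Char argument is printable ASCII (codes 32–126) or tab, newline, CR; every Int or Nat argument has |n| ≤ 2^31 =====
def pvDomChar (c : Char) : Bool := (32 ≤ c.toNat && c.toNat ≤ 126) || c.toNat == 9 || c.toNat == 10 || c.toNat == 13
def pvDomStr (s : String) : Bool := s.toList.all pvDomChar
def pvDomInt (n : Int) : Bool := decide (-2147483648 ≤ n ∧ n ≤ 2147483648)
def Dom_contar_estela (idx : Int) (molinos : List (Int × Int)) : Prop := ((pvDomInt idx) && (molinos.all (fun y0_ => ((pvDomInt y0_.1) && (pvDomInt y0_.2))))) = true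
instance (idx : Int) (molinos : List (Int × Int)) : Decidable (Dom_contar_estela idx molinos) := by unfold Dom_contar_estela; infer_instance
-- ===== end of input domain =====

-- B replaces A's per-element branch chain by a frequency table (dict) of the other windmills'
-- positions built once, then seven constant-key lookups summed (alternative decomposition).


-- ===== PORT A =====
def contar_estela (idx : Int) (molinos : List (Int × Int)) : Int :=
  match PySem.List.pyGet? molinos idx with
  | none => 0    -- IndexError in Python; excluded by Pre_
  | some molino =>
    (PySem.List.enumerate molinos).foldl (fun estela p =>
      let i := p.1
      let otro := p.2
      if i = idx then estela
      else if otro = molino then estela + 1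
      else if molino.1 = otro.1 ∧ 0 < molino.2 - otro.2 ∧ molino.2 - otro.2 ≤ 3 then
        estela + 1
      else if molino.2 = otro.2 ∧ 0 < otro.1 - molino.1 ∧ otro.1 - molino.1 ≤ 3 then
        estela + 1
      else estela) 0

-- ===== PORT B =====
def contar_estela_alt (idx : Int) (molinos : List (Int × Int)) : Int :=
  match PySem.List.pyGet? molinos idx with
  | none => 0    -- IndexError in Python; excluded by Pre_
  | some m0 =>
    let x := m0.1
    let y := m0.2
    let contador : PySem.Dict (Int × Int) Int :=
      (PySem.List.enumerate molinos).foldl (fun d p =>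
        if p.1 ≠ idx then d.insert (p.2.1, p.2.2) (d.getD (p.2.1, p.2.2) 0 + 1) else d)
        PySem.Dict.empty
    [(x, y), (x, y - 1), (x, y - 2), (x, y - 3),
     (x + 1, y), (x + 2, y), (x + 3, y)].foldl
      (fun estela clave => estela + contador.getD clave 0) 0

-- ===== PRECONDITION & SPEC =====
-- Pre_ excludes exactly the inputs where Python A raises IndexError on molinos[idx].
def Pre_contar_estela (idx : Int) (molinos : List (Int × Int)) : Prop :=
  PySem.Raise.InRange molinos.length idx
instance (idx : Int) (molinos : List (Int × Int)) : Decidable (Pre_contar_estela idx molinos) := by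
  unfold Pre_contar_estela; infer_instance
def pvWitness_contar_estela : Int × (List (Int × Int)) := (0, [(0, 0), (0, -1), (5, 5)])
def Spec_contar_estela (idx : Int) (molinos : List (Int × Int)) (out : Int) : Prop := out = contar_estela_alt idx molinos
instance (idx : Int) (molinos : List (Int × Int)) (out : Int) : Decidable (Spec_contar_estela idx molinos out) := by unfold Spec_contar_estela; infer_instance

-- ===== CLAIM (what is proved, stated in full; the proofs are below) =====
def Claim_equal_contar_estela : Prop := ∀ (idx : Int) (molinos : List (Int × Int)), Dom_contar_estela idx molinos → Pre_contar_estela idx molinos → Spec_contar_estela idx molinos (contar_estela idx molinos)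

-- ===== LEMMAS AND PROOFS =====

-- the seven coordinate keys around (x, y)
def keys7 (x y : Int) : List (Int × Int) :=
  [(x, y), (x, y - 1), (x, y - 2), (x, y - 3), (x + 1, y), (x + 2, y), (x + 3, y)]

lemma keys7_nodup (x y : Int) : (keys7 x y).Nodup := by
  simp [keys7, List.nodup_cons, Prod.ext_iff]
  omega

-- A's per-element branch chain tests exactly membership in keys7.
lemma branch_iff (x y a b : Int) :
    ((a, b) = (x, y) ∨ (x = a ∧ 0 < y - b ∧ y - b ≤ 3) ∨ (b = y ∧ 0 < a - x ∧ a - x ≤ 3))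
      ↔ (a, b) ∈ keys7 x y := by
  simp [keys7, Prod.ext_iff]
  omega

-- A's counting fold over the simplified step = countP over the filtered, projected list
lemma A_fold (idx x y : Int) (l : List (Int × (Int × Int))) (s : Int) :
    l.foldl (fun s p => if p.1 ≠ idx then (if decide (p.2 ∈ keys7 x y) then s + 1 else s) else s) s
      = s + (((l.filter (fun p => decide (p.1 ≠ idx))).map (fun p : Int × (Int × Int) => p.2)).countP
          (fun b => decide (b ∈ keys7 x y)) : Nat) := by
  induction l generalizing s with
  | nil => simp
  | cons p l ih =>
    simp only [List.foldl_cons, List.filter_cons]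
    by_cases h : p.1 = idx
    · rw [if_neg (not_not_intro h),
          if_neg (show ¬ (decide (p.1 ≠ idx) = true) by simp [h])]
      exact ih s
    · rw [if_pos (show p.1 ≠ idx from h),
          if_pos (show decide (p.1 ≠ idx) = true by simp [h]),
          List.map_cons, List.countP_cons]
      by_cases hm : p.2 ∈ keys7 x y
      · rw [if_pos (show decide (p.2 ∈ keys7 x y) = true from decide_eq_true hm),
            if_pos (show decide (p.2 ∈ keys7 x y) = true from decide_eq_true hm), ih (s + 1)]
        push_cast
        ring
      · rw [if_neg (show ¬ (decide (p.2 ∈ keys7 x y) = true) by simpa using hm),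
            if_neg (show ¬ (decide (p.2 ∈ keys7 x y) = true) by simpa using hm), ih s]
        simp

-- B's dict-building fold: every lookup is a count in the filtered, projected list
lemma B_dict (idx : Int) (l : List (Int × (Int × Int))) (d : PySem.Dict (Int × Int) Int)
    (k : Int × Int) :
    (l.foldl (fun d p =>
        if p.1 ≠ idx then d.insert (p.2.1, p.2.2) (d.getD (p.2.1, p.2.2) 0 + 1) else d) d).getD k 0
      = d.getD k 0
        + (((l.filter (fun p => decide (p.1 ≠ idx))).map (fun p : Int × (Int × Int) => p.2)).count k : Nat) := by
  induction l generalizing d with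
  | nil => simp
  | cons p l ih =>
    simp only [List.foldl_cons, List.filter_cons]
    by_cases h : p.1 = idx
    · rw [if_neg (not_not_intro h),
          if_neg (show ¬ (decide (p.1 ≠ idx) = true) by simp [h])]
      exact ih d
    · rw [if_pos (show p.1 ≠ idx from h),
          if_pos (show decide (p.1 ≠ idx) = true by simp [h]),
          List.map_cons, List.count_cons, ih, PySem.Dict.getD_insert]
      by_cases hk : k = (p.2.1, p.2.2)
      · rw [if_pos hk, if_pos (show (p.2 == k) = true from beq_iff_eq.mpr hk.symm), hk]
        push_cast
        ring
      · rw [if_neg hk, if_neg (show ¬ ((p.2 == k) = true) from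
            fun hc => hk (by rw [← eq_of_beq hc]))]
        simp

-- summing a pointwise-equal function over a list gives the same fold
lemma foldl_add_congr {β : Type} (f g : β → Int) (l : List β) (h : ∀ k ∈ l, f k = g k)
    (a : Int) :
    l.foldl (fun s k => s + f k) a = l.foldl (fun s k => s + g k) a := by
  induction l generalizing a with
  | nil => rfl
  | cons k l ih =>
    simp only [List.foldl_cons, h k (by simp)]
    exact ih (fun k hk => h k (by simp [hk])) _

-- splitting countP over membership in a cons of distinct keys
lemma countP_mem_cons (k : Int × Int) (ks : List (Int × Int)) (hk : k ∉ ks)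
    (l : List (Int × Int)) :
    l.countP (fun b => decide (b ∈ k :: ks)) = l.count k + l.countP (fun b => decide (b ∈ ks)) := by
  induction l with
  | nil => simp
  | cons b l ih =>
    rw [List.countP_cons, List.count_cons, List.countP_cons, ih]
    by_cases hb : b = k
    · simp [hb, hk]
      omega
    · by_cases hbs : b ∈ ks <;> simp [hb, hbs] <;> omega

-- summing counts over a nodup key list = countP of membership
lemma foldl_sum_count (ks : List (Int × Int)) (hnd : ks.Nodup)
    (l : List (Int × Int)) (a : Int) :
    ks.foldl (fun s k => s + (l.count k : Int)) a
      = a + (l.countP (fun b => decide (b ∈ ks)) : Nat) := by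
  induction ks generalizing a with
  | nil => simp
  | cons k ks ih =>
    have hk : k ∉ ks := (List.nodup_cons.mp hnd).1
    have hnd' : ks.Nodup := (List.nodup_cons.mp hnd).2
    rw [List.foldl_cons, ih hnd', countP_mem_cons k ks hk]
    push_cast
    ring

theorem contar_estela_spec : Claim_equal_contar_estela := by
  intro idx molinos _ hpre
  unfold Spec_contar_estela contar_estela contar_estela_alt
  cases hg : PySem.List.pyGet? molinos idx with
  | none => exact absurd hpre ((PySem.List.pyGet?_eq_none_iff molinos idx).mp hg)
  | some m0 =>
    obtain ⟨x, y⟩ := m0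
    simp only []
    -- rewrite A's step into a guarded membership step
    have hstep : (fun (estela : Int) (p : Int × (Int × Int)) =>
        let i := p.1
        let otro := p.2
        if i = idx then estela
        else if otro = (x, y) then estela + 1
        else if (x, y).1 = otro.1 ∧ 0 < (x, y).2 - otro.2 ∧ (x, y).2 - otro.2 ≤ 3 then
          estela + 1
        else if (x, y).2 = otro.2 ∧ 0 < otro.1 - (x, y).1 ∧ otro.1 - (x, y).1 ≤ 3 then
          estela + 1
        else estela)
        = (fun (s : Int) (p : Int × (Int × Int)) =>
            if p.1 ≠ idx then (if decide (p.2 ∈ keys7 x y) then s + 1 else s) else s) := by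
      funext s p
      obtain ⟨i, a, b⟩ := p
      by_cases hi : i = idx
      · simp [hi]
      · by_cases hm : (a, b) ∈ keys7 x y
        · rcases (branch_iff x y a b).mpr hm with h | h | h <;>
            simp_all <;> omega
        · have h1 : ¬ ((a, b) = (x, y)) :=
            fun h => hm ((branch_iff x y a b).mp (Or.inl h))
          have h2 : ¬ (x = a ∧ 0 < y - b ∧ y - b ≤ 3) :=
            fun h => hm ((branch_iff x y a b).mp (Or.inr (Or.inl h)))
          have h3 : ¬ (b = y ∧ 0 < a - x ∧ a - x ≤ 3) :=
            fun h => hm ((branch_iff x y a b).mp (Or.inr (Or.inr h)))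
          simp only [hi, hm, h1, decide_false, Bool.false_eq_true, if_false, ite_eq_right_iff]
          split_ifs with u <;> first | rfl | omega
    rw [hstep, A_fold]
    have hk7 : [(x, y), (x, y - 1), (x, y - 2), (x, y - 3),
        (x + 1, y), (x + 2, y), (x + 3, y)] = keys7 x y := rfl
    rw [hk7]
    rw [foldl_add_congr _
        (fun k => ((((PySem.List.enumerate molinos).filter (fun p => decide (p.1 ≠ idx))).map
          (fun p : Int × (Int × Int) => p.2)).count k : Int))
        (keys7 x y)
        (fun k _ => by rw [B_dict]; simp [PySem.Dict.getD_empty])]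
    exact (foldl_sum_count (keys7 x y) (keys7_nodup x y)
      (((PySem.List.enumerate molinos).filter (fun p => decide (p.1 ≠ idx))).map
        (fun p : Int × (Int × Int) => p.2)) 0).symm
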